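-- pv_equiv track=rewrite | github.com/MilaNLProc/syntax-lm | dep_parser.py | visit_single_tree
-- ===== SOURCE A (Python) =====
-- def get_key(val, par):
--     keys = list()
--     for i in range(len(par)):
--         if val == par[i]:
--             keys.append(i)
--
--     return keys
--
-- def visit_single_tree(par, parents):
--     children = get_key(par, parents)
--     visit_order = list()
--     parent_visit_order = list()
--     #one vector for node to visit, one vector for the parents
--     for child in reversed(children):
--         visit_order.append(child)
--         parent_visit_order.append(par)
--     #find next nodes to visit
--     for child in reversed(children):
--         v, p = visit_single_tree(child, parents)
--         visit_order = visit_order + v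
--         parent_visit_order = parent_visit_order + p
--
--     return visit_order, parent_visit_order
-- ===== SOURCE B (Python) =====
-- def visit_single_tree(par, parents):
--     # Build the parent -> children index once, instead of rescanning the
--     # whole parents list at every recursive call.
--     kids = {}
--     for i, p in enumerate(parents):
--         kids.setdefault(p, []).append(i)
--     visit, pvis = [], []
--
--     def go(node):
--         cs = kids.get(node, [])[::-1]
--         visit.extend(cs)
--         pvis.extend([node] * len(cs))
--         for c in cs:
--             go(c)
--
--     go(par)
--     return visit, pvis
-- ===== Notes on version B (the rewrite author's own statement) =====
-- stated objective: alternative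
-- what changed: B builds a parent-to-children index (dict of lists) in one pass and accumulates the traversal with extend on shared accumulators, instead of A's rescanning the whole parents list inside every recursive call and concatenating freshly returned pairs of lists.
import Mathlib
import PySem

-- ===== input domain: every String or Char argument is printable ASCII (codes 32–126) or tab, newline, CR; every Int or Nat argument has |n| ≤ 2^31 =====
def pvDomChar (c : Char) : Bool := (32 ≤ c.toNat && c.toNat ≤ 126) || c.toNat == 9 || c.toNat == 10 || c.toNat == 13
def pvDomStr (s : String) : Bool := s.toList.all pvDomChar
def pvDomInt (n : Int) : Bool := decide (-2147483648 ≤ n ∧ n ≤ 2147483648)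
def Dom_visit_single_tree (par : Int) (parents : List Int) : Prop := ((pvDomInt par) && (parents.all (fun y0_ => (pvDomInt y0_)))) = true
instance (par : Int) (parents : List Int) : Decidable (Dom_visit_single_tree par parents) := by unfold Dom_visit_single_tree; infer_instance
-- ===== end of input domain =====

-- B builds the parent→children index once and accumulates with extend, instead of A's
-- per-node rescans of the whole parents list (objective: alternative). Equality is about
-- the return value; neither program mutates its arguments.

-- ===== PORT A =====
-- get_key: scan all indices, collect those whose parent equals val.
-- par[i] is ported as pyGetD (exact: i ranges over 0..len-1, always in range).
def pvGetKey (val : Int) (par : List Int) : List Int :=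
  (PySem.List.pyRange 0 par.length 1).foldl
    (fun keys i => if val = PySem.List.pyGetD par i 0 then keys ++ [i] else keys) []

-- A's recursion, with a fuel guard for totality only (fuel parents.length+1 is enough
-- whenever the Python returns; on cyclic inputs Python A raises RecursionError — outside Pre_).
def pvVisitA (fuel : Nat) (par : Int) (parents : List Int) : List Int × List Int :=
  match fuel with
  | 0 => ([], [])
  | f + 1 =>
    let children := pvGetKey par parents
    let vp := children.reverse.foldl
        (fun (a : List Int × List Int) c => (a.1 ++ [c], a.2 ++ [par])) ([], [])
    children.reverse.foldl
      (fun (a : List Int × List Int) c =>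
        let r := pvVisitA f c parents
        (a.1 ++ r.1, a.2 ++ r.2)) vp

def visit_single_tree (par : Int) (parents : List Int) : List (List Int) :=
  let r := pvVisitA (parents.length + 1) par parents
  [r.1, r.2]

-- ===== PORT B =====
-- kids.setdefault(p, []).append(i)  ≡  Dict.modify p [] (· ++ [i])
def pvKids (parents : List Int) : PySem.Dict Int (List Int) :=
  (PySem.List.enumerate parents 0).foldl
    (fun d ip => d.modify ip.2 [] (· ++ [ip.1])) PySem.Dict.empty

-- the inner 'go' closure: accumulator-passing recursion; fuel is the totality guard only
-- (same bound as A's port; on cyclic inputs Python B raises RecursionError — outside Pre_).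
def pvGoB (fuel : Nat) (kids : PySem.Dict Int (List Int)) (node : Int)
    (acc : List Int × List Int) : List Int × List Int :=
  match fuel with
  | 0 => acc
  | f + 1 =>
    let cs := (kids.getD node []).reverse
    let acc := (acc.1 ++ cs, acc.2 ++ cs.map (fun _ => node))
    cs.foldl (fun a c => pvGoB f kids c a) acc

def visit_single_tree_alt (par : Int) (parents : List Int) : List (List Int) :=
  let kids := pvKids parents
  let r := pvGoB (parents.length + 1) kids par ([], [])
  [r.1, r.2]

-- ===== PRECONDITION & SPEC =====
-- one step up the parent map (only in-range indices have a parent)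
def pvUp (parents : List Int) (x : Int) : Option Int :=
  if 0 ≤ x ∧ x < (parents.length : Int) then parents[x.toNat]? else none

def pvUpIter (parents : List Int) : Nat → Int → Option Int
  | 0, x => some x
  | k + 1, x =>
    match pvUp parents x with
    | some y => pvUpIter parents k y
    | none => none

-- Pre_ excludes exactly the inputs where par lies on a cycle of the parent map,
-- on which the Python A never returns (RecursionError).
def Pre_visit_single_tree (par : Int) (parents : List Int) : Prop :=
  ∀ k < parents.length, pvUpIter parents (k + 1) par ≠ some par

instance (par : Int) (parents : List Int) : Decidable (Pre_visit_single_tree par parents) := by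
  unfold Pre_visit_single_tree; infer_instance

def pvWitness_visit_single_tree : Int × List Int := (0, [2, 0])

def Spec_visit_single_tree (par : Int) (parents : List Int) (out : List (List Int)) : Prop := out = visit_single_tree_alt par parents
instance (par : Int) (parents : List Int) (out : List (List Int)) : Decidable (Spec_visit_single_tree par parents out) := by unfold Spec_visit_single_tree; infer_instance

-- ===== CLAIM (what is proved, stated in full; the proofs are below) =====
def Claim_equal_visit_single_tree : Prop := ∀ (par : Int) (parents : List Int), Dom_visit_single_tree par parents → Pre_visit_single_tree par parents → Spec_visit_single_tree par parents (visit_single_tree par parents)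

-- ===== LEMMAS AND PROOFS =====

-- grouping fold: looking up c in the dict built by modify-append yields the first
-- components of all pairs whose second component is c, in order
theorem pv_kids_fold_getD (l : List (Int × Int)) (d : PySem.Dict Int (List Int)) (c : Int) :
    (l.foldl (fun d ip => d.modify ip.2 [] (· ++ [ip.1])) d).getD c []
      = d.getD c [] ++ (l.filter (fun ip => ip.2 == c)).map (·.1) := by
  induction l generalizing d with
  | nil => simp
  | cons p t ih =>
    simp only [List.foldl_cons, List.filter_cons]
    rw [ih]
    by_cases h : p.2 = c
    · simp [h, List.append_assoc]
    · simp [h, PySem.Dict.getD_modify, Ne.symm h]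

theorem pv_kids_getD (parents : List Int) (v : Int) :
    (pvKids parents).getD v [] = pvGetKey v parents := by
  unfold pvKids pvGetKey
  rw [pv_kids_fold_getD, PySem.List.foldl_append_ite_eq_filter,
      PySem.List.enumerate_eq_map_pyRange parents 0]
  simp only [PySem.Dict.getD_empty, List.nil_append, List.filter_map, List.map_map,
    Function.comp_def, List.map_id']
  apply List.filter_congr
  intro x _
  simp only [beq_eq_decide, decide_eq_decide]
  exact eq_comm

-- folding a pair-append function concatenates componentwise
theorem pv_pair_foldl (V P : Int → List Int) (cs : List Int) (a b : List Int) :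
    cs.foldl (fun (x : List Int × List Int) c => (x.1 ++ V c, x.2 ++ P c)) (a, b)
      = (a ++ cs.flatMap V, b ++ cs.flatMap P) := by
  induction cs generalizing a b with
  | nil => simp
  | cons c t ih => simp [ih, List.append_assoc]

-- main loop invariant: B's accumulator recursion computes A's recursion appended to acc
theorem pv_goB_eq (parents : List Int) (f : Nat) :
    ∀ (node : Int) (acc : List Int × List Int),
      pvGoB f (pvKids parents) node acc
        = (acc.1 ++ (pvVisitA f node parents).1, acc.2 ++ (pvVisitA f node parents).2) := by
  induction f with
  | zero => intro node acc; simp [pvGoB, pvVisitA]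
  | succ f ih =>
    intro node acc
    show (((pvKids parents).getD node []).reverse).foldl
        (fun a c => pvGoB f (pvKids parents) c a)
        (acc.1 ++ ((pvKids parents).getD node []).reverse,
         acc.2 ++ (((pvKids parents).getD node []).reverse).map (fun _ => node))
      = _
    rw [pv_kids_getD]
    have hfun : (fun (a : List Int × List Int) c => pvGoB f (pvKids parents) c a)
        = (fun (a : List Int × List Int) c =>
            (a.1 ++ (pvVisitA f c parents).1, a.2 ++ (pvVisitA f c parents).2)) := by
      funext a c; exact ih c a
    rw [hfun]
    have hmap : ((pvGetKey node parents).reverse).map (fun _ => node)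
        = ((pvGetKey node parents).reverse).flatMap (fun _ => [node]) := by
      simp [List.flatMap]
    rw [hmap]
    have h1 := pv_pair_foldl (fun c => [c]) (fun _ => [node])
        ((pvGetKey node parents).reverse) [] []
    have h2 := pv_pair_foldl (fun c => (pvVisitA f c parents).1)
        (fun c => (pvVisitA f c parents).2) ((pvGetKey node parents).reverse)
    show ((pvGetKey node parents).reverse).foldl _
        (acc.1 ++ (pvGetKey node parents).reverse,
         acc.2 ++ ((pvGetKey node parents).reverse).flatMap (fun _ => [node])) = _
    rw [h2]
    conv_rhs => rw [show pvVisitA (f + 1) node parents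
      = ((pvGetKey node parents).reverse).foldl
          (fun (a : List Int × List Int) c =>
            let r := pvVisitA f c parents
            (a.1 ++ r.1, a.2 ++ r.2))
          (((pvGetKey node parents).reverse).foldl
            (fun (a : List Int × List Int) c => (a.1 ++ [c], a.2 ++ [node])) ([], []))
      from rfl]
    rw [h1, pv_pair_foldl]
    simp [List.append_assoc, List.flatMap_singleton']

-- ===== VERDICT (by name: the statement is the Claim_ definition above) =====
theorem visit_single_tree_spec : Claim_equal_visit_single_tree := by
  intro par parents _ _
  have h := pv_goB_eq parents (parents.length + 1) par ([], [])
  simp [Spec_visit_single_tree, visit_single_tree, visit_single_tree_alt, h]
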